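-- pv_equiv track=rewrite | github.com/zehanort/RFdiffusion2 | rf_diffusion/benchmark/sweep_hyperparam.py | split_string_with_parentheses
-- ===== SOURCE A (Python) =====
-- def split_string_with_parentheses(string, delimiter=None):
--     '''
--     Splits a string using on delimiter (or whitespace if delimiter is None),
--     ignoring delimiters in between pairs of parentheses.
--     '''
--     if delimiter is None:
--         def is_delimiter(x):
--             return x.isspace()
--     else:
--         def is_delimiter(x):
--             return x == delimiter
--     result = []
--     current_word = ''
--     paren_count = 0
--
--     for char in string:
--         if char == '(':
--             paren_count += 1
--         elif char == ')':
--             paren_count -= 1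
--
--         if is_delimiter(char) and paren_count == 0:
--             if current_word:
--                 result.append(current_word)
--             current_word = ''
--         else:
--             current_word += char
--
--     if current_word:
--         result.append(current_word)
--
--     return result
-- ===== SOURCE B (Python) =====
-- def split_string_with_parentheses(string, delimiter=None):
--     '''
--     Splits a string using on delimiter (or whitespace if delimiter is None),
--     ignoring delimiters in between pairs of parentheses.
--     '''
--     if delimiter is None:
--         def is_delimiter(x):
--             return x.isspace()
--     else:
--         def is_delimiter(x):
--             return x == delimiter
--     # pass 1: indices of delimiters at parenthesis depth 0 (depth updated before the test)
--     cuts = []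
--     depth = 0
--     for i, ch in enumerate(string):
--         if ch == '(':
--             depth += 1
--         elif ch == ')':
--             depth -= 1
--         if depth == 0 and is_delimiter(ch):
--             cuts.append(i)
--     # pass 2: slice the string between consecutive cuts, keeping non-empty pieces
--     result = []
--     prev = 0
--     for c in cuts:
--         if prev < c:
--             result.append(string[prev:c])
--         prev = c + 1
--     if prev < len(string):
--         result.append(string[prev:])
--     return result
-- ===== Notes on version B (the rewrite author's own statement) =====
-- stated objective: alternative
-- what changed: Replaces the single-scan character-accumulator (building each word by += into current_word) with a two-pass index method: one scan records the indices of top-level delimiters, then the string is sliced between consecutive cut indices, keeping non-empty slices.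
import Mathlib
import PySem

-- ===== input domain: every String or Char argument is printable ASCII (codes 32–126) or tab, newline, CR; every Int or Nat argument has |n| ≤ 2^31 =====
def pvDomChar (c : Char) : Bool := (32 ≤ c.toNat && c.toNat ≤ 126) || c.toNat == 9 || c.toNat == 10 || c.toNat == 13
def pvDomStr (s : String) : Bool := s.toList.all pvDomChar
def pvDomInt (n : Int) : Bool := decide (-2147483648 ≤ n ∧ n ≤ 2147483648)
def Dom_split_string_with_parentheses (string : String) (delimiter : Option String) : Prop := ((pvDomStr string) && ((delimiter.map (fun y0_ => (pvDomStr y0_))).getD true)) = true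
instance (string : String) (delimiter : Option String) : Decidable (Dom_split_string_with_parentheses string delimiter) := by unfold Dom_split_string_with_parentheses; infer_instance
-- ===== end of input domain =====

-- B replaces A's single-scan character accumulator by a two-pass index method (collect top-level
-- delimiter indices, then slice between them); same asymptotic cost, alternative decomposition.

-- shared helper: the is_delimiter closure (identical in both Pythons)
def pvIsDelim (delimiter : Option String) (c : Char) : Bool :=
  match delimiter with
  | none => PySem.Chars.isspace c
  | some d => String.ofList [c] == d

-- shared helper: the paren_count update (identical if/elif in both Pythons)
def pvBump (c : Char) (d : Int) : Int :=
  if c = '(' then d + 1 else if c = ')' then d - 1 else d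

-- ===== PORT A =====
def pvStepA (delimiter : Option String) (st : List String × String × Int) (c : Char) :
    List String × String × Int :=
  let pc := pvBump c st.2.2
  if pvIsDelim delimiter c && pc == 0 then
    (st.1 ++ (if st.2.1 ≠ "" then [st.2.1] else []), "", pc)
  else
    (st.1, st.2.1.push c, pc)

def split_string_with_parentheses (string : String) (delimiter : Option String) : List String :=
  let fin := string.toList.foldl (pvStepA delimiter) ([], "", 0)
  fin.1 ++ (if fin.2.1 ≠ "" then [fin.2.1] else [])

-- ===== PORT B =====
-- pass 1 step: update depth, record index of a top-level delimiter
def pvStepCut (delimiter : Option String) (st : List Int × Int) (ic : Int × Char) :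
    List Int × Int :=
  let depth := pvBump ic.2 st.2
  if depth == 0 && pvIsDelim delimiter ic.2 then (st.1 ++ [ic.1], depth) else (st.1, depth)

-- pass 2 step: slice between consecutive cuts, keep non-empty slices
def pvStepSlice (string : String) (st : List String × Int) (c : Int) : List String × Int :=
  if st.2 < c then (st.1 ++ [PySem.Str.slice string (some st.2) (some c)], c + 1)
  else (st.1, c + 1)

def split_string_with_parentheses_alt (string : String) (delimiter : Option String) : List String :=
  let cuts := ((PySem.List.enumerate string.toList).foldl (pvStepCut delimiter) ([], 0)).1
  let p2 := cuts.foldl (pvStepSlice string) ([], 0)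
  if p2.2 < (PySem.Str.len string : Int) then
    p2.1 ++ [PySem.Str.slice string (some p2.2)]
  else p2.1

-- ===== PRECONDITION & SPEC =====
def Spec_split_string_with_parentheses (string : String) (delimiter : Option String) (out : List String) : Prop := out = split_string_with_parentheses_alt string delimiter
instance (string : String) (delimiter : Option String) (out : List String) : Decidable (Spec_split_string_with_parentheses string delimiter out) := by unfold Spec_split_string_with_parentheses; infer_instance

-- ===== CLAIM (what is proved, stated in full; the proofs are below) =====
def Claim_equal_split_string_with_parentheses : Prop := ∀ (string : String) (delimiter : Option String), Dom_split_string_with_parentheses string delimiter → Spec_split_string_with_parentheses string delimiter (split_string_with_parentheses string delimiter)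

-- ===== LEMMAS AND PROOFS =====

-- common recursive specification: split the remaining chars, given the pending word and depth
def pvSplitFrom (dl : Option String) : List Char → List Char → Int → List (List Char)
  | [], cur, _ => if cur = [] then [] else [cur]
  | c :: cs, cur, d =>
    let d' := pvBump c d
    if pvIsDelim dl c && d' == 0 then
      (if cur = [] then [] else [cur]) ++ pvSplitFrom dl cs [] d'
    else pvSplitFrom dl cs (cur ++ [c]) d'

-- indices (as Int casts of absolute positions) of top-level delimiters in the suffix cs starting at position i
def pvCutsFrom (dl : Option String) : Nat → List Char → Int → List Int
  | _, [], _ => []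
  | i, c :: cs, d =>
    let d' := pvBump c d
    (if pvIsDelim dl c && d' == 0 then [(i : Int)] else []) ++ pvCutsFrom dl (i + 1) cs d'

-- what pass 2 produces from a cut list and a previous boundary
def pvAssemble (full : List Char) : List Int → Int → List (List Char)
  | [], prev => if prev < (full.length : Int) then [PySem.List.slice full (some prev)] else []
  | c :: cuts, prev =>
    (if prev < c then [PySem.List.slice full (some prev) (some c)] else []) ++ pvAssemble full cuts (c + 1)

theorem pvStrSlice_eq (s : String) (a b : Option Int) :
    PySem.Str.slice s a b = String.ofList (PySem.List.slice s.toList a b) := by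
  apply String.toList_inj.mp; simp

-- A's fold computes pvSplitFrom
theorem pvA_char (dl : Option String) (cs : List Char) :
    ∀ (res : List String) (cur : String) (d : Int),
      (let fin := cs.foldl (pvStepA dl) (res, cur, d)
       fin.1 ++ (if fin.2.1 ≠ "" then [fin.2.1] else []))
      = res ++ (pvSplitFrom dl cs cur.toList d).map String.ofList := by
  induction cs with
  | nil =>
    intro res cur d
    by_cases h : cur = "" <;>
      simp [pvSplitFrom, String.toList_eq_nil_iff.mpr, h]
  | cons c cs ih =>
    intro res cur d
    simp only [List.foldl_cons, pvStepA, pvSplitFrom]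
    by_cases hb : (pvIsDelim dl c && pvBump c d == 0) = true
    · simp only [hb, if_pos, ih]
      by_cases h : cur = "" <;> simp [h, String.toList_eq_nil_iff, String.ofList_toList]
    · simp only [hb, if_neg, ih, Bool.not_eq_true] at *
      simp

-- B's first fold computes pvCutsFrom
theorem pvB_cuts (dl : Option String) (cs : List Char) :
    ∀ (i : Nat) (acc : List Int) (d : Int),
      ((PySem.List.enumerate cs (i : Int)).foldl (pvStepCut dl) (acc, d)).1
      = acc ++ pvCutsFrom dl i cs d := by
  induction cs with
  | nil => intro i acc d; simp [pvCutsFrom, PySem.List.enumerate_nil]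
  | cons c cs ih =>
    intro i acc d
    rw [PySem.List.enumerate_cons, List.foldl_cons]
    have hcast : ((i : Int) + 1) = ((i + 1 : Nat) : Int) := by push_cast; ring
    simp only [pvCutsFrom]
    by_cases hb : (pvIsDelim dl c && pvBump c d == 0) = true
    · have hs : pvStepCut dl (acc, d) ((i : Int), c) = (acc ++ [(i : Int)], pvBump c d) := by
        simp only [pvStepCut, Bool.and_comm]
        simp [hb]
      rw [hs, hcast, ih]
      simp [hb]
    · have hs : pvStepCut dl (acc, d) ((i : Int), c) = (acc, pvBump c d) := by
        simp only [pvStepCut, Bool.and_comm]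
        simp [hb]
      rw [hs, hcast, ih]
      simp [hb]

-- B's second fold computes pvAssemble
theorem pvB_assemble (s : String) (cuts : List Int) :
    ∀ (acc : List String) (prev : Int),
      (let p2 := cuts.foldl (pvStepSlice s) (acc, prev)
       if p2.2 < (PySem.Str.len s : Int) then p2.1 ++ [PySem.Str.slice s (some p2.2)] else p2.1)
      = acc ++ (pvAssemble s.toList cuts prev).map String.ofList := by
  induction cuts with
  | nil =>
    intro acc prev
    simp only [List.foldl_nil, pvAssemble, PySem.Str.len]
    by_cases h : prev < ((s.toList.length : Nat) : Int) <;>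
      · simp only [String.length_toList] at h
        simp [h, pvStrSlice_eq]
  | cons c cuts ih =>
    intro acc prev
    by_cases h : prev < c
    · have hs : pvStepSlice s (acc, prev) c
          = (acc ++ [PySem.Str.slice s (some prev) (some c)], c + 1) := by
        simp [pvStepSlice, h]
      rw [List.foldl_cons, hs, ih]
      simp [pvAssemble, h, pvStrSlice_eq]
    · have hs : pvStepSlice s (acc, prev) c = (acc, c + 1) := by simp [pvStepSlice, h]
      rw [List.foldl_cons, hs, ih]
      simp [pvAssemble, h]

-- key: assembling the slices between the cuts gives the recursive split
theorem pvKey (dl : Option String) (cs : List Char) :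
    ∀ (d : Int) (pre mid : List Char),
      pvAssemble (pre ++ mid ++ cs) (pvCutsFrom dl (pre.length + mid.length) cs d) ((pre.length : Int))
      = pvSplitFrom dl cs mid d := by
  induction cs with
  | nil =>
    intro d pre mid
    simp only [pvCutsFrom, pvSplitFrom, pvAssemble, List.append_nil]
    rcases eq_or_ne mid [] with h | h
    · subst h; simp
    · have hlen : 0 < mid.length := List.length_pos_of_ne_nil h
      have hlt : ((pre.length : Int)) < (((pre ++ mid).length : Nat) : Int) := by
        simp only [List.length_append]; push_cast; omega
      rw [if_pos hlt, if_neg h, PySem.List.slice_from _ (by positivity)]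
      simp
  | cons c cs ih =>
    intro d pre mid
    simp only [pvCutsFrom, pvSplitFrom]
    by_cases hb : (pvIsDelim dl c && pvBump c d == 0) = true
    · have hIH := ih (pvBump c d) (pre ++ mid ++ [c]) []
      simp only [List.append_nil, List.length_append, List.length_cons, List.length_nil,
        Nat.add_zero, Nat.zero_add] at hIH
      have hfull : (pre ++ mid ++ [c]) ++ cs = pre ++ mid ++ c :: cs := by
        simp [List.append_assoc]
      rw [hfull] at hIH
      simp only [hb, if_pos, List.singleton_append, pvAssemble]
      rcases eq_or_ne mid [] with h | h
      · subst h
        simp only [List.length_nil, Nat.add_zero, List.append_nil] at hIH ⊢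
        push_cast at hIH ⊢
        simpa using hIH
      · have hlen : 0 < mid.length := List.length_pos_of_ne_nil h
        have hlt : ((pre.length : Int)) < ((pre.length + mid.length : Nat) : Int) := by
          push_cast; omega
        rw [if_pos hlt, if_neg h,
          PySem.List.slice_toNat _ (by positivity) (by positivity)]
        simp only [Int.toNat_natCast]
        have hsl : ((pre ++ mid ++ c :: cs).drop pre.length).take
            (pre.length + mid.length - pre.length) = mid := by
          rw [List.append_assoc, List.drop_left]
          simp
        have hidx : ((pre.length + mid.length : Nat) : Int) + 1
            = ((pre.length + mid.length + 1 : Nat) : Int) := by push_cast; ring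
        rw [hsl, hidx, hIH]
    · have hIH := ih (pvBump c d) pre (mid ++ [c])
      simp only [List.length_append, List.length_cons, List.length_nil] at hIH
      have hfull : pre ++ (mid ++ [c]) ++ cs = pre ++ mid ++ c :: cs := by
        simp [List.append_assoc]
      have hidx : (pre.length + (mid.length + 1)) = (pre.length + mid.length + 1) := by ring
      rw [hfull] at hIH
      simp only [hb, if_neg, Bool.not_eq_true] at *
      simp only [List.nil_append, hidx] at hIH ⊢
      rw [hIH]

-- ===== VERDICT (by name: the statement is the Claim_ definition above) =====
theorem split_string_with_parentheses_spec : Claim_equal_split_string_with_parentheses := by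
  intro string delimiter _
  unfold Spec_split_string_with_parentheses split_string_with_parentheses split_string_with_parentheses_alt
  have hA := pvA_char delimiter string.toList [] "" 0
  have hC := pvB_cuts delimiter string.toList 0 [] 0
  have hS := pvB_assemble string (pvCutsFrom delimiter 0 string.toList 0) [] 0
  have hK := pvKey delimiter string.toList 0 [] []
  simp only [List.nil_append, List.length_nil, Nat.cast_zero, String.toList_empty] at hA hC hS hK
  simp only [hA, hC, hS, hK]
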